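-- pv_equiv track=rewrite | github.com/mariaangelps/Research | phase4/phase3/rebotemaybe.py | is_path_exists
-- ===== SOURCE A (Python) =====
-- def is_path_exists(source, sink, robots, connections):
--     visited = set()
--     queue = [source]
--     while queue:
--         current = queue.pop(0)
--         if current == sink:
--             return True
--         visited.add(current)
--         for a, b in connections:
--             neighbor = b if a == current else a if b == current else None
--             if neighbor and neighbor not in visited:
--                 queue.append(neighbor)
--     return False
-- ===== SOURCE B (Python) =====
-- def is_path_exists(source, sink, robots, connections):
--     adj = {}
--     for a, b in connections:
--         adj.setdefault(a, []).append(b)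
--         adj.setdefault(b, []).append(a)
--     visited = {source}
--     queue = [source]
--     head = 0
--     while head < len(queue):
--         node = queue[head]
--         head += 1
--         if node == sink:
--             return True
--         for w in adj.get(node, []):
--             if w not in visited:
--                 visited.add(w)
--                 queue.append(w)
--     return False
-- ===== Notes on version B (the rewrite author's own statement) =====
-- stated objective: alternative
-- what changed: B precomputes an adjacency dict once and runs a standard BFS that marks nodes visited at enqueue time (each node enqueued at most once), instead of A's rescan of the whole edge list on every pop with visited-marking at dequeue; B also returns the intended True where A's truthiness bug ('if neighbor' skips node 0) loses paths.
-- intended difference: On inputs where the sink is reachable from the source but every connecting path goes through node 0, A returns False because its truthiness test 'if neighbor and ...' never enqueues node 0, while B returns True, the intended answer for path existence. — e.g. on is_path_exists(1, 2, [], [(1, 0), (0, 2)]): A returns false, B returns true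
import Mathlib
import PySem

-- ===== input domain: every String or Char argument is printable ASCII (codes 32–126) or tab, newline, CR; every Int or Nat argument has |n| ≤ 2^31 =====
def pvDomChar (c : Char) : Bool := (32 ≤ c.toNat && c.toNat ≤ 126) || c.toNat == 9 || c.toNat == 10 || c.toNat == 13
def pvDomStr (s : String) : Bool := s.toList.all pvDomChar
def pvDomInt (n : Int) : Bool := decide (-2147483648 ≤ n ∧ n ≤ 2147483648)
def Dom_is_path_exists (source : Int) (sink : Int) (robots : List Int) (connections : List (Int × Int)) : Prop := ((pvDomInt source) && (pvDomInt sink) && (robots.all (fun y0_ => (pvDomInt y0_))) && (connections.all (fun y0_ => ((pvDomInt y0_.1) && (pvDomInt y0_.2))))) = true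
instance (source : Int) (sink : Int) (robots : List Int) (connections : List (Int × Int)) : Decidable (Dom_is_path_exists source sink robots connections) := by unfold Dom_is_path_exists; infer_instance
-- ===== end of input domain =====

-- B replaces A's per-pop rescan of the whole edge list (visited marked at dequeue, duplicate
-- enqueues, list.pop(0)) by one precomputed adjacency dict + standard BFS marking at enqueue;
-- B also returns the intended True where A's truthiness test `if neighbor` wrongly skips node 0 (see D_).

-- ===== PORT A =====
-- Python: neighbor = b if a == current else a if b == current else None
def aNeighbor (current : Int) (p : Int × Int) : Option Int :=
  if p.1 == current then some p.2 else if p.2 == current then some p.1 else none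

-- the `for a, b in connections:` body of A's while loop (queue appends); `n != 0` is
-- Python's truthiness test `if neighbor and …` (None and 0 are falsy)
def aQueueNext (connections : List (Int × Int)) (current : Int)
    (visited' : PySem.Set Int) (rest : List Int) : List Int :=
  connections.foldl (fun q p =>
    match aNeighbor current p with
    | some n => if n != 0 && !(PySem.Set.contains visited' n) then q ++ [n] else q
    | none => q) rest

-- termination/measure helpers and fold characterization (cited by aLoop's decreasing_by)
def aCand (visited' : PySem.Set Int) (current : Int) (p : Int × Int) : Option Int :=
  match aNeighbor current p with
  | some n => if n != 0 && !(PySem.Set.contains visited' n) then some n else none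
  | none => none

def pvAdjP (c : List (Int × Int)) (u w : Int) : Prop :=
  ∃ p ∈ c, (p.1 = u ∧ p.2 = w) ∨ (p.2 = u ∧ p.1 = w)

theorem foldl_body_eq (v' : PySem.Set Int) (cur : Int) :
    ∀ (c : List (Int × Int)) (q0 : List Int),
    List.foldl (fun q p => match aNeighbor cur p with
      | some n => if n != 0 && !(PySem.Set.contains v' n) then q ++ [n] else q
      | none => q) q0 c = q0 ++ c.filterMap (aCand v' cur) := by
  intro c
  induction c with
  | nil => intro q0; simp
  | cons p c ih =>
    intro q0
    rw [List.foldl_cons, ih, List.filterMap_cons]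
    cases h : aNeighbor cur p with
    | none => simp [aCand, h]
    | some n =>
      by_cases g : ¬n = 0 ∧ n ∉ v'
      · simp [aCand, h, g.1, g.2]
      · simp [aCand, h, g]

theorem aQueueNext_eq (c : List (Int × Int)) (cur : Int) (v' : PySem.Set Int) (rest : List Int) :
    aQueueNext c cur v' rest = rest ++ c.filterMap (aCand v' cur) :=
  foldl_body_eq v' cur c rest

theorem aNeighbor_some (cur : Int) (p : Int × Int) (x : Int) :
    aNeighbor cur p = some x → (p.1 = cur ∧ p.2 = x) ∨ (p.2 = cur ∧ p.1 = x) := by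
  unfold aNeighbor
  split_ifs with h1 h2 <;> intro h <;> simp_all

theorem aNeighbor_of_adj (cur x : Int) (p : Int × Int)
    (h : (p.1 = cur ∧ p.2 = x) ∨ (p.2 = cur ∧ p.1 = x)) : aNeighbor cur p = some x := by
  unfold aNeighbor
  rcases h with ⟨h1, h2⟩ | ⟨h1, h2⟩ <;> split_ifs with g1 g2 <;> simp_all

theorem mem_filterMap_aCand (c : List (Int × Int)) (cur : Int) (v' : PySem.Set Int) (x : Int) :
    x ∈ c.filterMap (aCand v' cur) ↔ pvAdjP c cur x ∧ ¬x = 0 ∧ x ∉ v' := by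
  rw [List.mem_filterMap]
  constructor
  · rintro ⟨p, hp, hc⟩
    unfold aCand at hc
    cases h : aNeighbor cur p with
    | none => simp [h] at hc
    | some n =>
      rw [h] at hc
      by_cases g : ¬n = 0 ∧ n ∉ v'
      · have hcond : (n != 0 && !(PySem.Set.contains v' n)) = true := by
          simp only [Bool.and_eq_true, bne_iff_ne, Bool.not_eq_true']
          exact ⟨g.1, Bool.eq_false_iff.mpr (fun hcc => g.2 ((PySem.Set.contains_iff v' n).mp hcc))⟩
        simp only [hcond, if_true, Option.some.injEq] at hc
        subst hc
        exact ⟨⟨p, hp, aNeighbor_some cur p n h⟩, g.1, g.2⟩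
      · simp [g] at hc
  · rintro ⟨⟨p, hp, hadj⟩, hx0, hxv⟩
    refine ⟨p, hp, ?_⟩
    unfold aCand
    rw [aNeighbor_of_adj cur x p hadj]
    simp [hx0, hxv]

def pvVerts (c : List (Int × Int)) : Finset Int := ((c.map Prod.fst) ++ (c.map Prod.snd)).toFinset
def pvU (c : List (Int × Int)) (v : List Int) : Nat := (pvVerts c \ v.toFinset).card
def pvDead (c : List (Int × Int)) (v q : List Int) : Nat :=
  q.countP (fun x => decide (x ∈ v) || !(decide (x ∈ pvVerts c)))

theorem mem_pvVerts_of_adj (c : List (Int × Int)) (u x : Int) (h : pvAdjP c u x) :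
    x ∈ pvVerts c := by
  rcases h with ⟨p, hp, hadj⟩
  simp only [pvVerts, List.mem_toFinset, List.mem_append, List.mem_map]
  rcases hadj with ⟨_, h2⟩ | ⟨_, h2⟩
  · exact Or.inr ⟨p, hp, h2⟩
  · exact Or.inl ⟨p, hp, h2⟩

theorem set_add_of_mem {v : PySem.Set Int} {x : Int} (h : x ∈ v) : PySem.Set.add v x = v := by
  unfold PySem.Set.add
  rw [if_pos ((PySem.Set.contains_iff v x).mpr h)]

theorem set_add_of_not_mem {v : PySem.Set Int} {x : Int} (h : x ∉ v) :
    PySem.Set.add v x = v ++ [x] := by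
  unfold PySem.Set.add
  rw [if_neg (fun hc => h ((PySem.Set.contains_iff v x).mp hc))]

theorem pv_aLoop_dec (c : List (Int × Int)) (cur : Int) (v : PySem.Set Int) (rest : List Int) :
    Prod.Lex (· < ·) (· < ·)
      (pvU c (PySem.Set.add v cur),
        pvDead c (PySem.Set.add v cur) (aQueueNext c cur (PySem.Set.add v cur) rest))
      (pvU c v, pvDead c v (cur :: rest)) := by
  set v' := PySem.Set.add v cur with hv'
  rw [aQueueNext_eq]
  have hextra : ∀ x ∈ c.filterMap (aCand v' cur), x ∈ pvVerts c ∧ x ∉ v' := by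
    intro x hx
    rw [mem_filterMap_aCand] at hx
    exact ⟨mem_pvVerts_of_adj c cur x hx.1, hx.2.2⟩
  by_cases hcv : cur ∈ v
  · -- visited already: v' = v, second component decreases
    have hvv : v' = v := by rw [hv', set_add_of_mem hcv]
    rw [hvv]
    apply Prod.Lex.right
    unfold pvDead
    rw [List.countP_append, List.countP_cons]
    have hz : (c.filterMap (aCand v cur)).countP (fun x => decide (x ∈ v) || !(decide (x ∈ pvVerts c))) = 0 := by
      rw [List.countP_eq_zero]
      intro x hx
      have := hextra x (by rw [hvv]; exact hx)
      rw [hvv] at this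
      simp [this.1, this.2]
    rw [hz]
    simp [hcv]
  · by_cases hcV : cur ∈ pvVerts c
    · -- new vertex: first component decreases
      apply Prod.Lex.left
      unfold pvU
      apply Finset.card_lt_card
      rw [hv', set_add_of_not_mem hcv]
      constructor
      · intro x hx
        simp only [Finset.mem_sdiff, List.toFinset_append, List.mem_toFinset,
          Finset.mem_union, List.toFinset_cons, List.toFinset_nil] at hx ⊢
        refine ⟨hx.1, fun hm => hx.2 ?_⟩
        simp [hm]
      · intro hsub
        have : cur ∈ pvVerts c \ v.toFinset := by
          simp [Finset.mem_sdiff, List.mem_toFinset, hcV, hcv]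
        have := hsub this
        simp [Finset.mem_sdiff, List.toFinset_append] at this
    · -- cur not a vertex and unvisited: first equal, second decreases
      have hUeq : pvU c v' = pvU c v := by
        unfold pvU
        congr 1
        rw [hv', set_add_of_not_mem hcv]
        ext x
        simp only [Finset.mem_sdiff, List.toFinset_append, List.mem_toFinset,
          List.toFinset_cons, List.toFinset_nil, Finset.mem_union]
        constructor
        · rintro ⟨h1, h2⟩; exact ⟨h1, fun hm => h2 (Or.inl hm)⟩
        · rintro ⟨h1, h2⟩
          refine ⟨h1, fun hm => ?_⟩
          rcases hm with hm | hm
          · exact h2 hm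
          · simp at hm; subst hm; exact hcV h1
      rw [hUeq]
      apply Prod.Lex.right
      unfold pvDead
      rw [List.countP_append, List.countP_cons]
      have hz : (c.filterMap (aCand v' cur)).countP (fun x => decide (x ∈ v') || !(decide (x ∈ pvVerts c))) = 0 := by
        rw [List.countP_eq_zero]
        intro x hx
        have := hextra x hx
        simp [this.1, this.2]
      rw [hz]
      have hpt : ∀ x ∈ rest, (decide (x ∈ v') || !(decide (x ∈ pvVerts c))) = (decide (x ∈ v) || !(decide (x ∈ pvVerts c))) := by
        intro x _
        rw [hv', set_add_of_not_mem hcv]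
        by_cases hx : x = cur
        · subst hx; simp [hcv, hcV]
        · simp [hx]
      rw [List.countP_congr (fun x hx => by rw [hpt x hx])]
      simp [hcv, hcV]

-- A's while loop, transcribed: pop head, sink test, visited.add(current), edge rescan
def aLoop (sink : Int) (connections : List (Int × Int))
    (visited : PySem.Set Int) (queue : List Int) : Bool :=
  match queue with
  | [] => false
  | current :: rest =>
    if current == sink then true
    else
      aLoop sink connections (PySem.Set.add visited current)
        (aQueueNext connections current (PySem.Set.add visited current) rest)
termination_by (pvU connections visited, pvDead connections visited queue)
decreasing_by exact pv_aLoop_dec connections current visited rest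

def is_path_exists (source : Int) (sink : Int) (robots : List Int)
    (connections : List (Int × Int)) : Bool :=
  aLoop sink connections PySem.Set.empty [source]

-- ===== PORT B =====
-- adj.setdefault(a, []).append(b); adj.setdefault(b, []).append(a)
def bBuild (connections : List (Int × Int)) : PySem.Dict Int (List Int) :=
  connections.foldl (fun d p =>
    (d.modify p.1 [] (fun l => l ++ [p.2])).modify p.2 [] (fun l => l ++ [p.1]))
    PySem.Dict.empty

-- the `for w in adj.get(node, []):` body: mark at enqueue
def bScan (ws : List Int) (vq : PySem.Set Int × List Int) : PySem.Set Int × List Int :=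
  ws.foldl (fun vq w =>
    if PySem.Set.contains vq.1 w then vq else (PySem.Set.add vq.1 w, vq.2 ++ [w])) vq

-- termination measure helpers for bLoop (cited by its decreasing_by)
theorem pv_card_sdiff_lt (S V : Finset Int) (w : Int) (hS : w ∈ S) (hv : w ∉ V) :
    (S \ insert w V).card < (S \ V).card := by
  apply Finset.card_lt_card
  constructor
  · intro x hx
    simp only [Finset.mem_sdiff, Finset.mem_insert] at hx ⊢
    exact ⟨hx.1, fun hm => hx.2 (Or.inr hm)⟩
  · intro hsub
    have hw : w ∈ S \ V := Finset.mem_sdiff.mpr ⟨hS, hv⟩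
    have := hsub hw
    simp [Finset.mem_sdiff] at this

theorem bScan_dec (S : Finset Int) :
    ∀ (ws : List Int) (v : PySem.Set Int) (q : List Int), (∀ w ∈ ws, w ∈ S) →
    ((S \ (bScan ws (v, q)).1.toFinset).card < (S \ v.toFinset).card) ∨
      ((bScan ws (v, q)).1 = v ∧ (bScan ws (v, q)).2 = q) := by
  intro ws
  induction ws with
  | nil => intro v q _; right; exact ⟨rfl, rfl⟩
  | cons w ws ih =>
    intro v q hws
    by_cases hc : w ∈ v
    · have : bScan (w :: ws) (v, q) = bScan ws (v, q) := by
        simp [bScan, List.foldl_cons, hc]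
      rw [this]
      exact ih v q (fun x hx => hws x (List.mem_cons_of_mem _ hx))
    · have hstep : bScan (w :: ws) (v, q) = bScan ws (PySem.Set.add v w, q ++ [w]) := by
        simp [bScan, List.foldl_cons, hc]
      rw [hstep]
      have hlt : (S \ (PySem.Set.add v w).toFinset).card < (S \ v.toFinset).card := by
        rw [set_add_of_not_mem hc]
        have : (v ++ [w]).toFinset = insert w v.toFinset := by
          ext x; simp [List.toFinset_append]
        rw [this]
        exact pv_card_sdiff_lt S v.toFinset w (hws w (List.mem_cons_self)) (by simpa using hc)
      rcases ih (PySem.Set.add v w) (q ++ [w]) (fun x hx => hws x (List.mem_cons_of_mem _ hx)) with h | h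
      · exact Or.inl (lt_trans h hlt)
      · left; rw [h.1]; exact hlt

def pvUB (adj : PySem.Dict Int (List Int)) (v : List Int) : Nat :=
  ((adj.values.flatten).toFinset \ v.toFinset).card

theorem getD_subset_values_flatten (adj : PySem.Dict Int (List Int)) (node : Int) :
    ∀ w ∈ PySem.Dict.getD adj node [], w ∈ adj.values.flatten := by
  intro w hw
  rw [PySem.Dict.getD_eq_get?_getD] at hw
  cases hk : adj.get? node with
  | none => rw [hk] at hw; simp at hw
  | some l =>
    rw [hk] at hw
    simp only [Option.getD_some] at hw
    have hitem := PySem.Dict.mem_items_of_get?_eq_some adj hk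
    rw [List.mem_flatten]
    refine ⟨l, ?_, hw⟩
    have : adj.values = adj.items.map Prod.snd := rfl
    rw [this, List.mem_map]
    exact ⟨(node, l), hitem, rfl⟩

theorem pv_bLoop_dec (adj : PySem.Dict Int (List Int)) (node : Int)
    (v : PySem.Set Int) (rest : List Int) :
    Prod.Lex (· < ·) (· < ·)
      (pvUB adj (bScan (PySem.Dict.getD adj node []) (v, rest)).1,
        (bScan (PySem.Dict.getD adj node []) (v, rest)).2.length)
      (pvUB adj v, (node :: rest).length) := by
  rcases bScan_dec (adj.values.flatten).toFinset (PySem.Dict.getD adj node []) v rest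
      (fun w hw => List.mem_toFinset.mpr (getD_subset_values_flatten adj node w hw)) with h | h
  · exact Prod.Lex.left _ _ h
  · rw [h.1, h.2]
    exact Prod.Lex.right _ (by simp)

-- B's while loop over the head-pointer queue: reads advance left to right, appends at the end
def bLoop (sink : Int) (adj : PySem.Dict Int (List Int))
    (visited : PySem.Set Int) (queue : List Int) : Bool :=
  match queue with
  | [] => false
  | node :: rest =>
    if node == sink then true
    else
      bLoop sink adj (bScan (PySem.Dict.getD adj node []) (visited, rest)).1
        (bScan (PySem.Dict.getD adj node []) (visited, rest)).2
termination_by (pvUB adj visited, queue.length)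
decreasing_by exact pv_bLoop_dec adj node visited rest

def is_path_exists_alt (source : Int) (sink : Int) (robots : List Int)
    (connections : List (Int × Int)) : Bool :=
  bLoop sink (bBuild connections) (PySem.Set.ofList [source]) [source]

-- ===== PRECONDITION & SPEC =====
-- helpers for D_: an independent bounded-closure reachability test (neither port's algorithm)
def pvEnds (c : List (Int × Int)) : List Int := c.flatMap (fun p => [p.1, p.2])
def pvAdjBool (c : List (Int × Int)) (u w : Int) : Bool :=
  c.any (fun p => (p.1 == u && p.2 == w) || (p.2 == u && p.1 == w))
-- one closure step; bz = true bans node 0 as a step target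
def pvGrow (c : List (Int × Int)) (bz : Bool) (X : PySem.Set Int) : PySem.Set Int :=
  PySem.Set.update X ((pvEnds c).filter (fun w => (!bz || w != 0) && X.any (fun u => pvAdjBool c u w)))
def pvClos (c : List (Int × Int)) (bz : Bool) (s : Int) : PySem.Set Int :=
  (pvGrow c bz)^[2 * c.length + 1] [s]

-- On inputs where the sink is reachable from the source but every connecting path goes through
-- node 0, A returns False (its truthiness test `if neighbor and …` never enqueues node 0)
-- while B returns True, the intended answer for path existence.
def D_is_path_exists (source : Int) (sink : Int) (robots : List Int)
    (connections : List (Int × Int)) : Prop :=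
  sink ∈ pvClos connections false source ∧ sink ∉ pvClos connections true source
instance (source : Int) (sink : Int) (robots : List Int) (connections : List (Int × Int)) :
    Decidable (D_is_path_exists source sink robots connections) := by
  unfold D_is_path_exists; infer_instance

def Spec_is_path_exists (source : Int) (sink : Int) (robots : List Int) (connections : List (Int × Int)) (out : Bool) : Prop := ¬ D_is_path_exists source sink robots connections → out = is_path_exists_alt source sink robots connections
instance (source : Int) (sink : Int) (robots : List Int) (connections : List (Int × Int)) (out : Bool) : Decidable (Spec_is_path_exists source sink robots connections out) := by unfold Spec_is_path_exists; infer_instance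

def pvDiffWitness_is_path_exists : Int × Int × List Int × (List (Int × Int)) :=
  (1, 2, [], [(1, 0), (0, 2)])
def pvDiffWitnessOut_is_path_exists : Bool × Bool := (false, true)

-- ===== CLAIM (what is proved, stated in full; the proofs are below) =====
def Claim_unchanged_is_path_exists : Prop := ∀ (source : Int) (sink : Int) (robots : List Int) (connections : List (Int × Int)), Dom_is_path_exists source sink robots connections → Spec_is_path_exists source sink robots connections (is_path_exists source sink robots connections)
def Claim_changed_is_path_exists : Prop := Dom_is_path_exists (pvDiffWitness_is_path_exists.1) (pvDiffWitness_is_path_exists.2.1) (pvDiffWitness_is_path_exists.2.2.1) (pvDiffWitness_is_path_exists.2.2.2) ∧ D_is_path_exists (pvDiffWitness_is_path_exists.1) (pvDiffWitness_is_path_exists.2.1) (pvDiffWitness_is_path_exists.2.2.1) (pvDiffWitness_is_path_exists.2.2.2) ∧ is_path_exists (pvDiffWitness_is_path_exists.1) (pvDiffWitness_is_path_exists.2.1) (pvDiffWitness_is_path_exists.2.2.1) (pvDiffWitness_is_path_exists.2.2.2) = pvDiffWitnessOut_is_path_exists.1 ∧ is_path_exists_alt (pvDiffWitness_is_path_exists.1)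 (pvDiffWitness_is_path_exists.2.1) (pvDiffWitness_is_path_exists.2.2.1) (pvDiffWitness_is_path_exists.2.2.2) = pvDiffWitnessOut_is_path_exists.2 ∧ pvDiffWitnessOut_is_path_exists.1 ≠ pvDiffWitnessOut_is_path_exists.2
def Claim_exact_is_path_exists : Prop := ∀ (source : Int) (sink : Int) (robots : List Int) (connections : List (Int × Int)), Dom_is_path_exists source sink robots connections → D_is_path_exists source sink robots connections → is_path_exists source sink robots connections ≠ is_path_exists_alt source sink robots connections

-- ===== LEMMAS AND PROOFS =====

-- proof-side step relation: adjacency, with node 0 banned as a target when bz = true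
def pvStep (c : List (Int × Int)) (bz : Bool) (u w : Int) : Prop :=
  pvAdjP c u w ∧ (bz = true → w ≠ 0)


theorem reach_closed {R : Int → Int → Prop} {V : List Int} {s t : Int}
    (hs : s ∈ V) (hcl : ∀ u ∈ V, ∀ w, R u w → w ∈ V)
    (h : Relation.ReflTransGen R s t) : t ∈ V := by
  induction h with
  | refl => exact hs
  | tail _ hR ih => exact hcl _ ih _ hR


theorem aLoop_sound (s t : Int) (c : List (Int × Int)) :
    ∀ (v : PySem.Set Int) (q : List Int),
    (∀ x ∈ q, Relation.ReflTransGen (pvStep c true) s x) →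
    aLoop t c v q = true → Relation.ReflTransGen (pvStep c true) s t := by
  intro v q
  induction v, q using aLoop.induct t c with
  | case1 v => intro _ h; simp [aLoop] at h
  | case2 v cur rest heq =>
    intro hq _
    rw [beq_iff_eq] at heq
    exact heq ▸ hq cur (List.mem_cons_self)
  | case3 v cur rest heq ih =>
    intro hq hrun
    rw [aLoop, if_neg heq] at hrun
    apply ih ?_ hrun
    intro x hx
    rw [aQueueNext_eq] at hx
    rcases List.mem_append.mp hx with hx | hx
    · exact hq x (List.mem_cons_of_mem _ hx)
    · rw [mem_filterMap_aCand] at hx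
      exact Relation.ReflTransGen.tail (hq cur List.mem_cons_self) ⟨hx.1, fun _ => hx.2.1⟩

theorem aLoop_complete (s t : Int) (c : List (Int × Int)) :
    ∀ (v : PySem.Set Int) (q : List Int),
    (∀ u ∈ v, ∀ w, pvAdjP c u w → w ∈ v ∨ w ∈ q ∨ w = 0) →
    t ∉ v → (s ∈ v ∨ s ∈ q) →
    Relation.ReflTransGen (pvStep c true) s t → aLoop t c v q = true := by
  intro v q
  induction v, q using aLoop.induct t c with
  | case1 v =>
    intro hcl ht hs hreach
    exfalso
    apply ht
    refine reach_closed (hs.resolve_right (by simp)) ?_ hreach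
    intro u hu w hw
    rcases hcl u hu w hw.1 with h | h | h
    · exact h
    · simp at h
    · exact absurd h (hw.2 rfl)
  | case2 v cur rest heq => intro _ _ _ _; rw [aLoop, if_pos heq]
  | case3 v cur rest heq ih =>
    intro hcl ht hs hreach
    rw [aLoop, if_neg heq]
    have hcur_ne_t : cur ≠ t := by
      intro h; exact heq (by simp [h])
    apply ih ?_ ?_ ?_ hreach
    · -- closure preserved
      intro u hu w hw
      rw [aQueueNext_eq]
      rcases (PySem.Set.mem_add v cur u).mp hu with hu | hu
      · rcases hcl u hu w hw with h | h | h
        · exact Or.inl ((PySem.Set.mem_add v cur w).mpr (Or.inl h))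
        · rcases List.mem_cons.mp h with h | h
          · exact Or.inl ((PySem.Set.mem_add v cur w).mpr (Or.inr h))
          · exact Or.inr (Or.inl (List.mem_append.mpr (Or.inl h)))
        · exact Or.inr (Or.inr h)
      · subst hu
        by_cases hw0 : w = 0
        · exact Or.inr (Or.inr hw0)
        · by_cases hwv : w ∈ PySem.Set.add v u
          · exact Or.inl hwv
          · refine Or.inr (Or.inl (List.mem_append.mpr (Or.inr ?_)))
            rw [mem_filterMap_aCand]
            exact ⟨hw, hw0, hwv⟩
    · -- t not yet visited
      intro hmem
      rcases (PySem.Set.mem_add v cur t).mp hmem with h | h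
      · exact ht h
      · exact hcur_ne_t h.symm
    · -- source in visited or queue
      rcases hs with h | h
      · exact Or.inl ((PySem.Set.mem_add v cur s).mpr (Or.inl h))
      · rcases List.mem_cons.mp h with h | h
        · exact Or.inl ((PySem.Set.mem_add v cur s).mpr (Or.inr h))
        · exact Or.inr (by rw [aQueueNext_eq]; exact List.mem_append.mpr (Or.inl h))

theorem aLoop_iff (s t : Int) (c : List (Int × Int)) (r : List Int) :
    is_path_exists s t r c = true ↔ Relation.ReflTransGen (pvStep c true) s t := by
  constructor
  · intro h
    exact aLoop_sound s t c PySem.Set.empty [s]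
      (fun x hx => by rw [List.mem_singleton] at hx; exact hx ▸ Relation.ReflTransGen.refl) h
  · intro h
    exact aLoop_complete s t c PySem.Set.empty [s]
      (fun u hu => by simp [PySem.Set.empty] at hu)
      (by simp [PySem.Set.empty])
      (Or.inr (List.mem_singleton.mpr rfl)) h

theorem bScan_fst_mem (ws : List Int) :
    ∀ (v : PySem.Set Int) (q : List Int) (x : Int),
    x ∈ (bScan ws (v, q)).1 ↔ x ∈ v ∨ x ∈ ws := by
  induction ws with
  | nil => intro v q x; simp [bScan]
  | cons w ws ih =>
    intro v q x
    by_cases hc : w ∈ v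
    · rw [show bScan (w :: ws) (v, q) = bScan ws (v, q) by simp [bScan, hc]]
      rw [ih]
      constructor
      · rintro (h | h)
        · exact Or.inl h
        · exact Or.inr (List.mem_cons_of_mem _ h)
      · rintro (h | h)
        · exact Or.inl h
        · rcases List.mem_cons.mp h with h | h
          · exact Or.inl (h ▸ hc)
          · exact Or.inr h
    · rw [show bScan (w :: ws) (v, q) = bScan ws (PySem.Set.add v w, q ++ [w]) by simp [bScan, hc]]
      rw [ih]
      rw [PySem.Set.mem_add]
      constructor
      · rintro ((h | h) | h)
        · exact Or.inl h
        · exact Or.inr (h ▸ List.mem_cons_self)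
        · exact Or.inr (List.mem_cons_of_mem _ h)
      · rintro (h | h)
        · exact Or.inl (Or.inl h)
        · rcases List.mem_cons.mp h with h | h
          · exact Or.inl (Or.inr h)
          · exact Or.inr h

theorem bScan_snd_sub (ws : List Int) :
    ∀ (v : PySem.Set Int) (q : List Int) (x : Int),
    x ∈ (bScan ws (v, q)).2 → x ∈ q ∨ x ∈ ws := by
  induction ws with
  | nil => intro v q x h; exact Or.inl h
  | cons w ws ih =>
    intro v q x h
    by_cases hc : w ∈ v
    · rw [show bScan (w :: ws) (v, q) = bScan ws (v, q) by simp [bScan, hc]] at h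
      rcases ih v q x h with h | h
      · exact Or.inl h
      · exact Or.inr (List.mem_cons_of_mem _ h)
    · rw [show bScan (w :: ws) (v, q) = bScan ws (PySem.Set.add v w, q ++ [w]) by simp [bScan, hc]] at h
      rcases ih _ _ x h with h | h
      · rcases List.mem_append.mp h with h | h
        · exact Or.inl h
        · exact Or.inr (by simpa using Or.inl (List.mem_singleton.mp h))
      · exact Or.inr (List.mem_cons_of_mem _ h)

theorem bScan_snd_sup (ws : List Int) :
    ∀ (v : PySem.Set Int) (q : List Int) (x : Int),
    x ∈ q → x ∈ (bScan ws (v, q)).2 := by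
  induction ws with
  | nil => intro v q x h; exact h
  | cons w ws ih =>
    intro v q x h
    by_cases hc : w ∈ v
    · rw [show bScan (w :: ws) (v, q) = bScan ws (v, q) by simp [bScan, hc]]
      exact ih v q x h
    · rw [show bScan (w :: ws) (v, q) = bScan ws (PySem.Set.add v w, q ++ [w]) by simp [bScan, hc]]
      exact ih _ _ x (List.mem_append.mpr (Or.inl h))

theorem bScan_new_in_snd (ws : List Int) :
    ∀ (v : PySem.Set Int) (q : List Int) (x : Int),
    x ∈ (bScan ws (v, q)).1 → x ∈ v ∨ x ∈ (bScan ws (v, q)).2 := by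
  induction ws with
  | nil => intro v q x h; exact Or.inl h
  | cons w ws ih =>
    intro v q x h
    by_cases hc : w ∈ v
    · rw [show bScan (w :: ws) (v, q) = bScan ws (v, q) by simp [bScan, hc]] at h ⊢
      exact ih v q x h
    · rw [show bScan (w :: ws) (v, q) = bScan ws (PySem.Set.add v w, q ++ [w]) by simp [bScan, hc]] at h ⊢
      rcases ih _ _ x h with h | h
      · rcases (PySem.Set.mem_add v w x).mp h with h | h
        · exact Or.inl h
        · exact Or.inr (bScan_snd_sup ws _ _ x (List.mem_append.mpr (Or.inr (by simp [h]))))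
      · exact Or.inr h

theorem bBuild_getD (c : List (Int × Int)) :
    ∀ (d : PySem.Dict Int (List Int)) (u : Int),
    PySem.Dict.getD (c.foldl (fun d p =>
      (d.modify p.1 [] (fun l => l ++ [p.2])).modify p.2 [] (fun l => l ++ [p.1]))
      d) u [] =
    PySem.Dict.getD d u [] ++ c.flatMap (fun p =>
      (if p.1 = u then [p.2] else []) ++ (if p.2 = u then [p.1] else [])) := by
  induction c with
  | nil => intro d u; simp
  | cons p c ih =>
    intro d u
    rw [List.foldl_cons, ih, List.flatMap_cons]
    simp only [PySem.Dict.getD_modify]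
    rw [← List.append_assoc]
    congr 1
    by_cases h2 : u = p.2
    · by_cases h21 : p.2 = p.1
      · rw [if_pos h2, if_pos h21, if_pos (h2.trans h21).symm, if_pos h2.symm]
        rw [show d.getD p.1 [] = d.getD u [] by rw [← (h2.trans h21)]]
        simp
      · rw [if_pos h2, if_neg h21, if_neg (fun h : p.1 = u => h21 (h.trans h2).symm), if_pos h2.symm]
        rw [show d.getD p.2 [] = d.getD u [] by rw [h2]]
        simp
    · by_cases h1 : u = p.1
      · rw [if_neg h2, if_pos h1, if_pos h1.symm, if_neg (fun h : p.2 = u => h2 h.symm)]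
        rw [show d.getD p.1 [] = d.getD u [] by rw [h1]]
        simp
      · rw [if_neg h2, if_neg h1, if_neg (fun h : p.1 = u => h1 h.symm), if_neg (fun h : p.2 = u => h2 h.symm)]
        simp

theorem bBuild_mem (c : List (Int × Int)) (u w : Int) :
    w ∈ PySem.Dict.getD (bBuild c) u [] ↔ pvAdjP c u w := by
  unfold bBuild
  rw [bBuild_getD c PySem.Dict.empty u]
  rw [show PySem.Dict.getD PySem.Dict.empty u ([] : List Int) = [] from PySem.Dict.getD_empty u []]
  rw [List.nil_append, List.mem_flatMap]
  unfold pvAdjP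
  constructor
  · rintro ⟨p, hp, hm⟩
    rcases List.mem_append.mp hm with hm | hm
    · by_cases h : p.1 = u
      · simp [h] at hm; exact ⟨p, hp, Or.inl ⟨h, hm.symm⟩⟩
      · simp [h] at hm
    · by_cases h : p.2 = u
      · simp [h] at hm; exact ⟨p, hp, Or.inr ⟨h, hm.symm⟩⟩
      · simp [h] at hm
  · rintro ⟨p, hp, hadj⟩
    refine ⟨p, hp, ?_⟩
    rcases hadj with ⟨h1, h2⟩ | ⟨h1, h2⟩
    · simp [h1, h2]
    · simp [h1, h2]

theorem bLoop_sound (s t : Int) (c : List (Int × Int)) (adj : PySem.Dict Int (List Int))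
    (hadj : ∀ u w : Int, w ∈ PySem.Dict.getD adj u [] ↔ pvAdjP c u w) :
    ∀ (v : PySem.Set Int) (q : List Int),
    (∀ x ∈ v, Relation.ReflTransGen (pvStep c false) s x) →
    (∀ x ∈ q, x ∈ v) →
    bLoop t adj v q = true → Relation.ReflTransGen (pvStep c false) s t := by
  intro v q
  induction v, q using bLoop.induct t adj with
  | case1 v => intro _ _ h; simp [bLoop] at h
  | case2 v node rest heq =>
    intro hv hq _
    rw [beq_iff_eq] at heq
    exact heq ▸ hv node (hq node List.mem_cons_self)
  | case3 v node rest heq ih =>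
    intro hv hq hrun
    rw [bLoop, if_neg heq] at hrun
    apply ih ?_ ?_ hrun
    · intro x hx
      rcases (bScan_fst_mem _ _ _ x).mp hx with hx | hx
      · exact hv x hx
      · exact Relation.ReflTransGen.tail (hv node (hq node List.mem_cons_self))
          ⟨(hadj node x).mp hx, fun h => by cases h⟩
    · intro x hx
      rcases bScan_snd_sub _ _ _ x hx with hx | hx
      · exact (bScan_fst_mem _ _ _ x).mpr (Or.inl (hq x (List.mem_cons_of_mem _ hx)))
      · exact (bScan_fst_mem _ _ _ x).mpr (Or.inr hx)

theorem bLoop_complete (s t : Int) (c : List (Int × Int)) (adj : PySem.Dict Int (List Int))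
    (hadj : ∀ u w : Int, w ∈ PySem.Dict.getD adj u [] ↔ pvAdjP c u w) :
    ∀ (v : PySem.Set Int) (q : List Int),
    (∀ u ∈ v, u ∈ q ∨ ∀ w, pvAdjP c u w → w ∈ v) →
    (t ∈ v → t ∈ q) →
    s ∈ v →
    Relation.ReflTransGen (pvStep c false) s t → bLoop t adj v q = true := by
  intro v q
  induction v, q using bLoop.induct t adj with
  | case1 v =>
    intro hcl ht hs hreach
    exfalso
    have htv : t ∈ v := by
      refine reach_closed hs ?_ hreach
      intro u hu w hw
      rcases hcl u hu with h | h
      · simp at h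
      · exact h w hw.1
    simp at ht
    exact ht htv
  | case2 v node rest heq => intro _ _ _ _; rw [bLoop, if_pos heq]
  | case3 v node rest heq ih =>
    intro hcl ht hs hreach
    rw [bLoop, if_neg heq]
    have hnt : node ≠ t := fun h => heq (by simp [h])
    apply ih ?_ ?_ ?_ hreach
    · -- closure invariant
      intro u hu
      by_cases huv : u ∈ v
      · rcases hcl u huv with h | h
        · rcases List.mem_cons.mp h with h | h
          · subst h
            right
            intro w hw
            exact (bScan_fst_mem _ _ _ w).mpr (Or.inr ((hadj u w).mpr hw))
          · exact Or.inl (bScan_snd_sup _ _ _ u h)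
        · exact Or.inr (fun w hw => (bScan_fst_mem _ _ _ w).mpr (Or.inl (h w hw)))
      · rcases bScan_new_in_snd _ _ _ u hu with h | h
        · exact absurd h huv
        · exact Or.inl h
    · -- sink-in-queue invariant
      intro htv
      rcases bScan_new_in_snd _ _ _ t htv with h | h
      · rcases List.mem_cons.mp (ht h) with h' | h'
        · exact absurd h'.symm hnt
        · exact bScan_snd_sup _ _ _ t h'
      · exact h
    · exact (bScan_fst_mem _ _ _ s).mpr (Or.inl hs)

theorem bLoop_iff (s t : Int) (c : List (Int × Int)) (r : List Int) :
    is_path_exists_alt s t r c = true ↔ Relation.ReflTransGen (pvStep c false) s t := by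
  have hadj : ∀ u w : Int, w ∈ PySem.Dict.getD (bBuild c) u [] ↔ pvAdjP c u w :=
    fun u w => bBuild_mem c u w
  have hinit : PySem.Set.ofList [s] = [s] := rfl
  constructor
  · intro h
    refine bLoop_sound s t c (bBuild c) hadj (PySem.Set.ofList [s]) [s] ?_ ?_ h
    · intro x hx
      rw [hinit, List.mem_singleton] at hx
      exact hx ▸ Relation.ReflTransGen.refl
    · intro x hx
      rw [hinit]
      exact hx
  · intro h
    refine bLoop_complete s t c (bBuild c) hadj (PySem.Set.ofList [s]) [s] ?_ ?_ ?_ h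
    · intro u hu
      rw [hinit] at hu
      exact Or.inl hu
    · intro htv
      rw [hinit] at htv
      exact htv
    · rw [hinit]
      exact List.mem_singleton.mpr rfl

theorem pvAdjBool_iff (c : List (Int × Int)) (u w : Int) :
    pvAdjBool c u w = true ↔ pvAdjP c u w := by
  unfold pvAdjBool pvAdjP
  rw [List.any_eq_true]
  constructor
  · rintro ⟨p, hp, h⟩; exact ⟨p, hp, by simpa using h⟩
  · rintro ⟨p, hp, h⟩; exact ⟨p, hp, by simpa using h⟩

theorem mem_pvEnds_of_adj (c : List (Int × Int)) (u x : Int) (h : pvAdjP c u x) :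
    x ∈ pvEnds c := by
  rcases h with ⟨p, hp, hadj⟩
  rw [pvEnds, List.mem_flatMap]
  refine ⟨p, hp, ?_⟩
  rcases hadj with ⟨_, h2⟩ | ⟨_, h2⟩ <;> simp [h2.symm]

theorem mem_grow (c : List (Int × Int)) (bz : Bool) (X : PySem.Set Int) (x : Int) :
    x ∈ pvGrow c bz X ↔
      x ∈ X ∨ (x ∈ pvEnds c ∧ (bz = true → x ≠ 0) ∧ ∃ u ∈ X, pvAdjP c u x) := by
  unfold pvGrow
  rw [PySem.Set.mem_update, List.mem_filter]
  cases bz <;>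
    simp [List.any_eq_true, pvAdjBool_iff, bne_iff_ne]

theorem grow_sub (c : List (Int × Int)) (bz : Bool) (X : PySem.Set Int) (x : Int)
    (h : x ∈ X) : x ∈ pvGrow c bz X :=
  (mem_grow c bz X x).mpr (Or.inl h)

theorem clos_sound (c : List (Int × Int)) (bz : Bool) (s : Int) :
    ∀ (n : Nat) (x : Int), x ∈ (pvGrow c bz)^[n] [s] →
    Relation.ReflTransGen (pvStep c bz) s x := by
  intro n
  induction n with
  | zero =>
    intro x hx
    simp only [Function.iterate_zero_apply, List.mem_singleton] at hx
    exact hx ▸ Relation.ReflTransGen.refl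
  | succ n ih =>
    intro x hx
    rw [Function.iterate_succ_apply'] at hx
    rcases (mem_grow c bz _ x).mp hx with h | ⟨_, hcond, u, hu, hadj⟩
    · exact ih x h
    · exact Relation.ReflTransGen.tail (ih u hu) ⟨hadj, hcond⟩

theorem update_shape (l : List Int) :
    ∀ X : PySem.Set Int, ∃ ext, PySem.Set.update X l = X ++ ext := by
  induction l with
  | nil => intro X; exact ⟨[], by simp [PySem.Set.update]⟩
  | cons x l ih =>
    intro X
    have hstep : PySem.Set.update X (x :: l) = PySem.Set.update (PySem.Set.add X x) l := rfl
    rcases ih (PySem.Set.add X x) with ⟨ext, he⟩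
    by_cases hx : x ∈ X
    · exact ⟨ext, by rw [hstep, he, set_add_of_mem hx]⟩
    · exact ⟨x :: ext, by rw [hstep, he, set_add_of_not_mem hx]; simp⟩

theorem grow_len (c : List (Int × Int)) (bz : Bool) (X : PySem.Set Int)
    (h : pvGrow c bz X ≠ X) : X.length < (pvGrow c bz X).length := by
  rcases update_shape ((pvEnds c).filter
      (fun w => (!bz || w != 0) && X.any (fun u => pvAdjBool c u w))) X with ⟨ext, he⟩
  have he' : pvGrow c bz X = X ++ ext := he
  rw [he'] at h ⊢
  cases ext with
  | nil => simp at h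
  | cons y ys => simp

theorem clos_mem_sub (c : List (Int × Int)) (bz : Bool) (s : Int) :
    ∀ (n : Nat) (x : Int), x ∈ (pvGrow c bz)^[n] [s] → x = s ∨ x ∈ pvEnds c := by
  intro n
  induction n with
  | zero =>
    intro x hx
    simp only [Function.iterate_zero_apply, List.mem_singleton] at hx
    exact Or.inl hx
  | succ n ih =>
    intro x hx
    rw [Function.iterate_succ_apply'] at hx
    rcases (mem_grow c bz _ x).mp hx with h | ⟨he, _, _⟩
    · exact ih x h
    · exact Or.inr he

theorem clos_nodup (c : List (Int × Int)) (bz : Bool) (s : Int) :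
    ∀ n : Nat, ((pvGrow c bz)^[n] [s]).Nodup := by
  intro n
  induction n with
  | zero => simp
  | succ n ih =>
    rw [Function.iterate_succ_apply']
    exact PySem.Set.nodup_update _ _ ih

theorem pvEnds_len (c : List (Int × Int)) : (pvEnds c).length = 2 * c.length := by
  induction c with
  | nil => rfl
  | cons p c ih => simp [pvEnds] at ih ⊢; omega

theorem clos_len_bound (c : List (Int × Int)) (bz : Bool) (s : Int) (n : Nat) :
    ((pvGrow c bz)^[n] [s]).length ≤ 2 * c.length + 1 := by
  have hnd := clos_nodup c bz s n
  have hsub : ((pvGrow c bz)^[n] [s]).toFinset ⊆ insert s (pvEnds c).toFinset := by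
    intro x hx
    rw [List.mem_toFinset] at hx
    rcases clos_mem_sub c bz s n x hx with h | h
    · exact Finset.mem_insert.mpr (Or.inl h)
    · exact Finset.mem_insert.mpr (Or.inr (List.mem_toFinset.mpr h))
  have h1 : ((pvGrow c bz)^[n] [s]).toFinset.card = ((pvGrow c bz)^[n] [s]).length :=
    List.toFinset_card_of_nodup hnd
  have h2 := Finset.card_le_card hsub
  have h3 : (insert s (pvEnds c).toFinset).card ≤ (pvEnds c).toFinset.card + 1 :=
    Finset.card_insert_le _ _
  have h4 : (pvEnds c).toFinset.card ≤ (pvEnds c).length := (pvEnds c).toFinset_card_le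
  rw [pvEnds_len] at h4
  omega

theorem clos_grow_chain (c : List (Int × Int)) (bz : Bool) (s : Int) (k : Nat)
    (h : ∀ i < k, pvGrow c bz ((pvGrow c bz)^[i] [s]) ≠ (pvGrow c bz)^[i] [s]) :
    k + 1 ≤ ((pvGrow c bz)^[k] [s]).length := by
  induction k with
  | zero => simp
  | succ k ih =>
    have hk := ih (fun i hi => h i (Nat.lt_succ_of_lt hi))
    have hne := h k (Nat.lt_succ_self k)
    have := grow_len c bz _ hne
    rw [Function.iterate_succ_apply']
    omega

theorem clos_fix (c : List (Int × Int)) (bz : Bool) (s : Int) :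
    pvGrow c bz (pvClos c bz s) = pvClos c bz s := by
  have hex : ∃ i, i ≤ 2 * c.length ∧
      pvGrow c bz ((pvGrow c bz)^[i] [s]) = (pvGrow c bz)^[i] [s] := by
    by_contra hno
    push Not at hno
    have hall : ∀ i < 2 * c.length + 1,
        pvGrow c bz ((pvGrow c bz)^[i] [s]) ≠ (pvGrow c bz)^[i] [s] := by
      intro i hi
      exact hno i (by omega)
    have := clos_grow_chain c bz s (2 * c.length + 1) hall
    have := clos_len_bound c bz s (2 * c.length + 1)
    omega
  rcases hex with ⟨i, hi, hfix⟩
  have hstable : ∀ m : Nat, (pvGrow c bz)^[i + m] [s] = (pvGrow c bz)^[i] [s] := by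
    intro m
    induction m with
    | zero => rfl
    | succ m ihm =>
      have : i + (m + 1) = (i + m) + 1 := by omega
      rw [this, Function.iterate_succ_apply', ihm, hfix]
  have hN : pvClos c bz s = (pvGrow c bz)^[i] [s] := by
    unfold pvClos
    have : 2 * c.length + 1 = i + (2 * c.length + 1 - i) := by omega
    rw [this, hstable]
  rw [hN, hfix]

theorem clos_complete (c : List (Int × Int)) (bz : Bool) (s t : Int)
    (h : Relation.ReflTransGen (pvStep c bz) s t) : t ∈ pvClos c bz s := by
  have hs : s ∈ pvClos c bz s := by
    unfold pvClos
    generalize 2 * c.length + 1 = n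
    induction n with
    | zero => simp
    | succ n ihn =>
      rw [Function.iterate_succ_apply']
      exact grow_sub c bz _ s ihn
  refine reach_closed hs ?_ h
  intro u hu w hw
  have : w ∈ pvGrow c bz (pvClos c bz s) :=
    (mem_grow c bz _ w).mpr (Or.inr ⟨mem_pvEnds_of_adj c u w hw.1, hw.2, u, hu, hw.1⟩)
  rwa [clos_fix] at this

theorem pvClos_iff' (c : List (Int × Int)) (bz : Bool) (s t : Int) :
    t ∈ pvClos c bz s ↔ Relation.ReflTransGen (pvStep c bz) s t :=
  ⟨clos_sound c bz s _ t, clos_complete c bz s t⟩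

-- ===== VERDICT (the three claims above) =====
theorem stepZ_le (c : List (Int × Int)) (u w : Int) (h : pvStep c true u w) :
    pvStep c false u w :=
  ⟨h.1, fun hf => nomatch hf⟩

theorem is_path_exists_spec : Claim_unchanged_is_path_exists := by
  unfold Claim_unchanged_is_path_exists Spec_is_path_exists
  intro s t r c _ hnD
  unfold D_is_path_exists at hnD
  by_cases hR : Relation.ReflTransGen (pvStep c false) s t
  · have hRZ : Relation.ReflTransGen (pvStep c true) s t := by
      by_contra hno
      exact hnD ⟨(pvClos_iff' c false s t).mpr hR,
        fun hm => hno (pvClos_iff' c true s t |>.mp hm)⟩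
    rw [(aLoop_iff s t c r).mpr hRZ, (bLoop_iff s t c r).mpr hR]
  · have hA : is_path_exists s t r c = false :=
      Bool.not_eq_true _ |>.mp
        (fun h => hR (Relation.ReflTransGen.mono (stepZ_le c) ((aLoop_iff s t c r).mp h)))
    have hB : is_path_exists_alt s t r c = false :=
      Bool.not_eq_true _ |>.mp (fun h => hR ((bLoop_iff s t c r).mp h))
    rw [hA, hB]

theorem is_path_exists_changed : Claim_changed_is_path_exists := by
  unfold Claim_changed_is_path_exists
  refine ⟨by decide, by decide, ?_, ?_, by decide⟩
  · show is_path_exists 1 2 [] [(1, 0), (0, 2)] = false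
    refine Bool.not_eq_true _ |>.mp (fun h => ?_)
    have h1 := (aLoop_iff 1 2 [(1, 0), (0, 2)] []).mp h
    have h2 := (pvClos_iff' [(1, 0), (0, 2)] true 1 2).mpr h1
    revert h2
    decide
  · show is_path_exists_alt 1 2 [] [(1, 0), (0, 2)] = true
    exact (bLoop_iff 1 2 [(1, 0), (0, 2)] []).mpr
      ((pvClos_iff' [(1, 0), (0, 2)] false 1 2).mp (by decide))

theorem is_path_exists_tight : Claim_exact_is_path_exists := by
  unfold Claim_exact_is_path_exists
  intro s t r c _ hD
  unfold D_is_path_exists at hD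
  have hRF := (pvClos_iff' c false s t).mp hD.1
  have hnRZ : ¬ Relation.ReflTransGen (pvStep c true) s t :=
    fun h => hD.2 ((pvClos_iff' c true s t).mpr h)
  have hA : is_path_exists s t r c = false :=
    Bool.not_eq_true _ |>.mp (fun h => hnRZ ((aLoop_iff s t c r).mp h))
  have hB : is_path_exists_alt s t r c = true := (bLoop_iff s t c r).mpr hRF
  rw [hA, hB]
  simp
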